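-- pv_equiv track=rewrite | github.com/jaidevreddy/python_learnings | old/exercise2.py | exercise2
-- ===== SOURCE A (Python) =====
-- def exercise2(word):
--
--     word_list = []
--     final_list = []
--
--     for i in word:
--         word_list.append(i)
--
--     word_list.sort()
--
--     for item in word_list:
--
--         if item not in final_list:
--             final_list.append(item)
--
--     output = " ".join(final_list)
--     return output
-- ===== SOURCE B (Python) =====
-- def exercise2(word):
--     # Bucket / counting approach: mark present code points in a table,
--     # then sweep the codes in increasing order (no comparison sort, no dedup scan).
--     if not word:
--         return ""
--     hi = max(map(ord, word))
--     present = bytearray(hi + 1)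
--     for ch in word:
--         present[ord(ch)] = 1
--     return " ".join(chr(c) for c in range(hi + 1) if present[c])
-- ===== Notes on version B (the rewrite author's own statement) =====
-- stated objective: faster
-- what changed: Replaces A's comparison sort plus quadratic membership-scan dedup with a bucket sweep: mark each character's code point in a presence table, then emit codes in increasing order, so no sort and no dedup scan remain.
import Mathlib
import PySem

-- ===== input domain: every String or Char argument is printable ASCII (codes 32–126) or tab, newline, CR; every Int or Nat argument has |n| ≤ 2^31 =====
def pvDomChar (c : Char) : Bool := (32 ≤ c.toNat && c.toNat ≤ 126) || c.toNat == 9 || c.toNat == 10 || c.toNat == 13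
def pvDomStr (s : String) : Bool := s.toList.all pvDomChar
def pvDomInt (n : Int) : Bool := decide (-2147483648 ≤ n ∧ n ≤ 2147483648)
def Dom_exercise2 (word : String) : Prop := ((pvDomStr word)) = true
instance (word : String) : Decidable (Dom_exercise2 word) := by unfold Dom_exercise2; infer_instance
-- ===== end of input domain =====

-- B replaces A's comparison sort + quadratic membership-scan dedup by a bucket sweep: mark present
-- code points in a presence table, then emit codes 0..max in increasing order (no sort, no dedup scan).


-- ===== PORT A =====
def exercise2 (word : String) : String :=
  -- word_list = []; for i in word: word_list.append(i)
  let word_list : List Char := word.toList.foldl (fun acc i => acc ++ [i]) []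
  -- word_list.sort()
  let word_list := PySem.List.sorted word_list (fun x => x) false
  -- final_list = []; for item in word_list: if item not in final_list: final_list.append(item)
  let final_list := word_list.foldl (fun fl item => if item ∈ fl then fl else fl ++ [item]) []
  -- " ".join(final_list)  (joining 1-char strings)
  String.mk (PySem.Chars.join " ".toList (final_list.map (fun c => [c])))

-- ===== PORT B =====
def exercise2_alt (word : String) : String :=
  let cs := word.toList
  -- if not word: return ""
  if cs = [] then "" else
  -- hi = max(map(ord, word))   (list nonempty, so max? is some; getD is never hit)
  let hi : Nat := (PySem.List.max? (cs.map Char.toNat) (fun x => x)).getD 0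
  -- present = bytearray(hi + 1); for ch in word: present[ord(ch)] = 1   (index always in range)
  let present := cs.foldl (fun t ch => t.set ch.toNat true) (List.replicate (hi + 1) false)
  -- " ".join(chr(c) for c in range(hi + 1) if present[c])   (range over Nat codes 0..hi: exact, hi ≥ 0)
  String.mk (PySem.Chars.join " ".toList
    (((List.range (hi + 1)).filter (fun c => present.getD c false)).map (fun c => [Char.ofNat c])))

-- ===== PRECONDITION & SPEC =====
def Spec_exercise2 (word : String) (out : String) : Prop := out = exercise2_alt word
instance (word : String) (out : String) : Decidable (Spec_exercise2 word out) := by unfold Spec_exercise2; infer_instance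

-- ===== CLAIM (what is proved, stated in full; the proofs are below) =====
def Claim_equal_exercise2 : Prop := ∀ (word : String), Dom_exercise2 word → Spec_exercise2 word (exercise2 word)

-- ===== LEMMAS AND PROOFS =====

-- Char's order is the order of the code points.
theorem char_lt_iff (a b : Char) : a < b ↔ a.toNat < b.toNat :=
  UInt32.lt_iff_toNat_lt

-- A's dedup loop is exactly set-building (PySem.Set.add) over the list.
theorem foldl_dedup_eq_ofList (l : List Char) :
    l.foldl (fun fl item => if item ∈ fl then fl else fl ++ [item]) [] = PySem.Set.ofList l := by
  rw [PySem.Set.ofList_eq_foldl]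
  have hf : (fun (fl : List Char) item => if item ∈ fl then fl else fl ++ [item]) = PySem.Set.add := by
    funext fl item
    simp [PySem.Set.add, PySem.Set.contains]
  rw [hf]

-- B's marking loop: a table slot reads true iff some character of the list has that code
-- (all codes in range), or it was already true.
theorem table_getD (cs : List Char) : ∀ (t : List Bool),
    (∀ ch ∈ cs, ch.toNat < t.length) → ∀ (i : Nat),
    ((cs.foldl (fun t ch => t.set ch.toNat true) t).getD i false = true
      ↔ (∃ ch ∈ cs, ch.toNat = i) ∨ t.getD i false = true) := by
  induction cs with
  | nil => intro t _ i; simp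
  | cons c cs ih =>
    intro t hlen i
    simp only [List.foldl_cons]
    rw [ih (t.set c.toNat true)
      (fun ch hch => by rw [List.length_set]; exact hlen ch (List.mem_cons_of_mem _ hch))]
    have hset : (t.set c.toNat true).getD i false = true ↔ c.toNat = i ∨ t.getD i false = true := by
      have hc : c.toNat < t.length := hlen c List.mem_cons_self
      simp only [List.getD_eq_getElem?_getD, List.getElem?_set]
      by_cases h : c.toNat = i
      · have hi' : i < t.length := h ▸ hc
        simp [h, hi']
      · simp [h]
    rw [hset]
    constructor
    · rintro (⟨ch, hch, rfl⟩ | h | h)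
      · exact Or.inl ⟨ch, List.mem_cons_of_mem _ hch, rfl⟩
      · exact Or.inl ⟨c, List.mem_cons_self, h⟩
      · exact Or.inr h
    · rintro (⟨ch, hch, rfl⟩ | h)
      · rcases List.mem_cons.mp hch with rfl | hch
        · exact Or.inr (Or.inl rfl)
        · exact Or.inl ⟨ch, hch, rfl⟩
      · exact Or.inr (Or.inr h)

-- The presence-table slot i (starting from all-false) reads true iff some char of cs has code i.
theorem table_spec (cs : List Char) (n : Nat) (hlen : ∀ ch ∈ cs, ch.toNat < n) (i : Nat) :
    ((cs.foldl (fun t ch => t.set ch.toNat true) (List.replicate n false)).getD i false = true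
      ↔ ∃ ch ∈ cs, ch.toNat = i) := by
  rw [table_getD cs (List.replicate n false)
    (fun ch hch => by rw [List.length_replicate]; exact hlen ch hch) i]
  simp

-- The swept bucket list IS the sorted deduplicated character list.
theorem bucket_eq_sorted (cs : List Char) (hi : Nat) (hhi : ∀ ch ∈ cs, ch.toNat ≤ hi) :
    PySem.List.sorted (PySem.Set.ofList cs) (fun x => x) false
      = ((List.range (hi + 1)).filter
          (fun c => (cs.foldl (fun t ch => t.set ch.toNat true)
                      (List.replicate (hi + 1) false)).getD c false)).map Char.ofNat := by
  have hlen : ∀ ch ∈ cs, ch.toNat < hi + 1 := fun ch h => Nat.lt_succ_of_le (hhi ch h)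
  set p : Nat → Bool := fun c => (cs.foldl (fun t ch => t.set ch.toNat true)
                      (List.replicate (hi + 1) false)).getD c false with hp
  have hpc : ∀ i, p i = true ↔ ∃ ch ∈ cs, ch.toNat = i := fun i => table_spec cs (hi + 1) hlen i
  -- every member of the filtered range is the code of a character of cs
  have hmemcode : ∀ i ∈ (List.range (hi + 1)).filter p, ∃ ch ∈ cs, ch.toNat = i := by
    intro i hi'
    exact (hpc i).mp (List.of_mem_filter hi')
  -- the mapped list is strictly increasing in Char order
  have hpl : ((List.range (hi + 1)).filter p).Pairwise (· < ·) :=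
    List.pairwise_lt_range.sublist List.filter_sublist
  have hpl' : (((List.range (hi + 1)).filter p).map Char.ofNat).Pairwise (· < ·) := by
    rw [List.pairwise_map]
    refine hpl.imp_of_mem ?_
    intro a b ha hb hab
    obtain ⟨cha, hcha, rfl⟩ := hmemcode a ha
    obtain ⟨chb, hchb, rfl⟩ := hmemcode b hb
    rw [Char.ofNat_toNat, Char.ofNat_toNat, char_lt_iff]
    exact hab
  apply PySem.List.sorted_eq_of_perm_of_pairwise_lt
  · -- permutation: both are nodup with the same membership
    rw [List.perm_ext_iff_of_nodup (hpl'.imp ne_of_lt) (PySem.Set.nodup_ofList _)]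
    intro x
    rw [PySem.Set.mem_ofList, List.mem_map]
    constructor
    · rintro ⟨i, hi', rfl⟩
      obtain ⟨ch, hch, rfl⟩ := hmemcode i hi'
      rwa [Char.ofNat_toNat]
    · intro hx
      refine ⟨x.toNat, List.mem_filter.mpr ⟨List.mem_range.mpr (hlen x hx), (hpc _).mpr ⟨x, hx, rfl⟩⟩,
        Char.ofNat_toNat x⟩
  · exact hpl'

-- sorting commutes with first-occurrence dedup: set-building keeps a SUBLIST …
theorem foldl_add_sublist (xs : List Char) : ∀ acc : List Char,
    ∃ t, xs.foldl PySem.Set.add acc = acc ++ t ∧ t.Sublist xs := by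
  induction xs with
  | nil => intro acc; exact ⟨[], by simp, List.Sublist.refl _⟩
  | cons x xs ih =>
    intro acc
    by_cases h : x ∈ acc
    · obtain ⟨t, ht, hs⟩ := ih acc
      refine ⟨t, ?_, hs.cons x⟩
      simpa [List.foldl_cons, PySem.Set.add, PySem.Set.contains, h] using ht
    · obtain ⟨t, ht, hs⟩ := ih (acc ++ [x])
      refine ⟨x :: t, ?_, hs.cons₂ x⟩
      simpa [List.foldl_cons, PySem.Set.add, PySem.Set.contains, h] using ht

theorem ofList_sublist (xs : List Char) : (PySem.Set.ofList xs).Sublist xs := by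
  obtain ⟨t, ht, hs⟩ := foldl_add_sublist xs []
  rw [PySem.Set.ofList_eq_foldl, ht]; simpa using hs

-- … so dedup-after-sort equals sort-after-dedup.
theorem key_lemma (l : List Char) :
    PySem.List.sorted (PySem.Set.ofList l) (fun x => x) false
      = PySem.Set.ofList (PySem.List.sorted l (fun x => x) false) := by
  apply PySem.List.sorted_eq_of_perm_of_pairwise_lt
  · rw [List.perm_ext_iff_of_nodup (PySem.Set.nodup_ofList _) (PySem.Set.nodup_ofList _)]
    intro a
    simp [PySem.Set.mem_ofList, PySem.List.mem_sorted]
  · have hle : (PySem.Set.ofList (PySem.List.sorted l (fun x => x) false)).Pairwise (· ≤ ·) :=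
      (PySem.List.sorted_pairwise l (fun x => x)).sublist (ofList_sublist _)
    have hne : (PySem.Set.ofList (PySem.List.sorted l (fun x => x) false)).Pairwise (· ≠ ·) :=
      PySem.Set.nodup_ofList _
    exact (hle.and hne).imp (fun h => lt_of_le_of_ne h.1 h.2)

-- ===== VERDICT (by name: the statement is the Claim_ definition above) =====
theorem exercise2_spec : Claim_equal_exercise2 := by
  intro word _
  unfold Spec_exercise2 exercise2 exercise2_alt
  by_cases h : word.toList = []
  · simp [h, PySem.List.sorted, PySem.Chars.join, List.intercalate]
    rfl
  · rw [if_neg h]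
    simp only [PySem.List.foldl_append_singleton, List.nil_append,
      foldl_dedup_eq_ofList, ← key_lemma]
    -- the guard hi really is an upper bound for every code
    have hne : word.toList.map Char.toNat ≠ [] := fun hmap => h (List.map_eq_nil_iff.mp hmap)
    obtain ⟨m, hm⟩ : ∃ m, PySem.List.max? (word.toList.map Char.toNat) (fun x => x) = some m := by
      rcases Option.eq_none_or_eq_some (PySem.List.max? (word.toList.map Char.toNat) (fun x => x)) with hn | hs
      · exact absurd (by simpa [PySem.List.max?_eq_none_iff] using hn) hne
      · exact hs
    have hhi : ∀ ch ∈ word.toList, ch.toNat ≤ (PySem.List.max? (word.toList.map Char.toNat) (fun x => x)).getD 0 := by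
      intro ch hch
      rw [hm, Option.getD_some]
      exact PySem.List.max?_isMax hm ch.toNat (List.mem_map_of_mem hch)
    rw [bucket_eq_sorted word.toList _ hhi, List.map_map]
    rfl
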